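-- pv_equiv track=rewrite | github.com/a1928375/FSM-Finite-State-Machines | Simulating Nondeterminism.py | nfsmsim
-- ===== SOURCE A (Python) =====
-- def nfsmsim(string, current, edges, accepting):
--
--     if string == "":
--
--         return current in accepting
--
--     else:
--
--         letter = string[0]
--
--         if (current, letter) in edges:
--
--             remaining = string[1:]
--
--             newstates = edges[(current, letter)]
--
--             for newstate in newstates:
--
--                 if nfsmsim(remaining, newstate, edges, accepting):
--
--                     return True
--
--         return False
-- ===== SOURCE B (Python) =====
-- def nfsmsim(string, current, edges, accepting):
--     # Subset simulation: one pass over the string tracking the ordered list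
--     # of reachable states, instead of recursive exploration of each path.
--     states = [current]
--     for letter in string:
--         nxt = []
--         for s in states:
--             if (s, letter) in edges:
--                 for n in edges[(s, letter)]:
--                     if n not in nxt:
--                         nxt.append(n)
--         states = nxt
--     return any(s in accepting for s in states)
-- ===== Notes on version B (the rewrite author's own statement) =====
-- stated objective: alternative
-- what changed: Replaced the recursive exploration of individual nondeterministic paths by an iterative subset simulation that sweeps the string once maintaining the list of reachable states.
import Mathlib
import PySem

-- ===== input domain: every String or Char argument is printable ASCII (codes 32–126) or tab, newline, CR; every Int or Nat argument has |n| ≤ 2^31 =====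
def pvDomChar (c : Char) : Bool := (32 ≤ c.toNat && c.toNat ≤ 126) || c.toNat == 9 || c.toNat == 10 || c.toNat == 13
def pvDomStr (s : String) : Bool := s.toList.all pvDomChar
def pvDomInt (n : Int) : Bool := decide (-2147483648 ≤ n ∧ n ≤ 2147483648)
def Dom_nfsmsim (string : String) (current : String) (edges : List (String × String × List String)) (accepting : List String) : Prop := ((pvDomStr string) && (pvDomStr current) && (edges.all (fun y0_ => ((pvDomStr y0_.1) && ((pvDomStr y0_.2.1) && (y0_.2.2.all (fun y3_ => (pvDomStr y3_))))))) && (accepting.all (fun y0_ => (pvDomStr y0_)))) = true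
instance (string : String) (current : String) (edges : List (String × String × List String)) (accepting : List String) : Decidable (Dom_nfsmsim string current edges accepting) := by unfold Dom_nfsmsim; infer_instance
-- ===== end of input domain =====

-- ===== PORT A =====
-- Header: B replaces A's recursive exploration of individual nondeterministic paths by a
-- single-pass reachable-state-set (subset) simulation; same return value on every input.

-- A-side helper: Python's "(current, letter) in edges" / "edges[(current, letter)]"
-- (association-list lookup, first match = dict lookup under the type convention)
def lookupEdge (edges : List (String × String × List String)) (c l : String) : Option (List String) :=
  match edges with
  | [] => none
  | (a, b, ns) :: rest => if a = c ∧ b = l then some ns else lookupEdge rest c l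

-- literal transliteration of A: recursion on the string, try each successor
-- (the for-loop with early "return True" is List.any)
def nfsmsimGo (cs : List Char) (current : String) (edges : List (String × String × List String)) (accepting : List String) : Bool :=
  match cs with
  | [] => accepting.contains current
  | c :: rest =>
    match lookupEdge edges current (String.ofList [c]) with
    | some newstates => newstates.any (fun s => nfsmsimGo rest s edges accepting)
    | none => false

def nfsmsim (string : String) (current : String) (edges : List (String × String × List String)) (accepting : List String) : Bool :=
  nfsmsimGo string.toList current edges accepting

-- ===== PORT B =====
-- B-side helpers: append successors not yet present (ordered dedup, as Source B does)
def addNew (acc : List String) (ns : List String) : List String :=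
  ns.foldl (fun a n => if a.contains n then a else a ++ [n]) acc

-- one letter of subset simulation: successors of every currently reachable state
def stepStates (edges : List (String × String × List String)) (letter : String) (states : List String) : List String :=
  states.foldl (fun nxt s =>
    match lookupEdge edges s letter with
    | some ns => addNew nxt ns
    | none => nxt) []

-- literal transliteration of B: fold the subset step over the string, then test acceptance
def nfsmsim_alt (string : String) (current : String) (edges : List (String × String × List String)) (accepting : List String) : Bool :=
  (string.toList.foldl (fun states c => stepStates edges (String.ofList [c]) states) [current]).any
    (fun s => accepting.contains s)

-- ===== PRECONDITION & SPEC =====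
def Spec_nfsmsim (string : String) (current : String) (edges : List (String × String × List String)) (accepting : List String) (out : Bool) : Prop := out = nfsmsim_alt string current edges accepting
instance (string : String) (current : String) (edges : List (String × String × List String)) (accepting : List String) (out : Bool) : Decidable (Spec_nfsmsim string current edges accepting out) := by unfold Spec_nfsmsim; infer_instance

-- ===== CLAIM (what is proved, stated in full; the proofs are below) =====
def Claim_equal_nfsmsim : Prop := ∀ (string : String) (current : String) (edges : List (String × String × List String)) (accepting : List String), Dom_nfsmsim string current edges accepting → Spec_nfsmsim string current edges accepting (nfsmsim string current edges accepting)

-- ===== LEMMAS AND PROOFS =====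

theorem mem_addNew (ns : List String) (acc : List String) (x : String) :
    x ∈ addNew acc ns ↔ x ∈ acc ∨ x ∈ ns := by
  induction ns generalizing acc with
  | nil => simp [addNew]
  | cons n ns ih =>
    simp only [addNew, List.foldl_cons] at *
    by_cases h : acc.contains n
    · simp only [h, if_pos]
      rw [ih]
      constructor
      · rintro (hx | hx)
        · exact Or.inl hx
        · exact Or.inr (List.mem_cons_of_mem _ hx)
      · rintro (hx | hx)
        · exact Or.inl hx
        · rcases List.mem_cons.mp hx with rfl | hx
          · exact Or.inl (by simpa using h)
          · exact Or.inr hx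
    · simp only [h, if_neg, Bool.false_eq_true, not_false_iff]
      rw [ih]
      simp [List.mem_append, List.mem_cons, or_assoc, or_comm, or_left_comm]
  
theorem mem_stepFold (edges : List (String × String × List String)) (letter : String)
    (sts : List String) (init : List String) (x : String) :
    x ∈ sts.foldl (fun nxt s =>
        match lookupEdge edges s letter with
        | some ns => addNew nxt ns
        | none => nxt) init ↔
      x ∈ init ∨ ∃ s ∈ sts, ∃ ns, lookupEdge edges s letter = some ns ∧ x ∈ ns := by
  induction sts generalizing init with
  | nil => simp
  | cons s sts ih =>
    simp only [List.foldl_cons]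
    rcases h : lookupEdge edges s letter with _ | ns
    · simp only [ih]
      constructor
      · rintro (hx | hx)
        · exact Or.inl hx
        · exact Or.inr (by rcases hx with ⟨t, ht, hns⟩; exact ⟨t, List.mem_cons_of_mem _ ht, hns⟩)
      · rintro (hx | ⟨t, ht, ns', hl, hn⟩)
        · exact Or.inl hx
        · rcases List.mem_cons.mp ht with rfl | ht
          · simp [h] at hl
          · exact Or.inr ⟨t, ht, ns', hl, hn⟩
    · simp only [ih, mem_addNew]
      constructor
      · rintro ((hx | hx) | hx)
        · exact Or.inl hx
        · exact Or.inr ⟨s, List.mem_cons_self .., ns, h, hx⟩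
        · exact Or.inr (by rcases hx with ⟨t, ht, hns⟩; exact ⟨t, List.mem_cons_of_mem _ ht, hns⟩)
      · rintro (hx | ⟨t, ht, ns', hl, hn⟩)
        · exact Or.inl (Or.inl hx)
        · rcases List.mem_cons.mp ht with rfl | ht
          · rw [h] at hl; cases hl; exact Or.inl (Or.inr hn)
          · exact Or.inr ⟨t, ht, ns', hl, hn⟩

theorem subset_sim_eq (edges : List (String × String × List String)) (accepting : List String)
    (cs : List Char) (sts : List String) :
    (cs.foldl (fun states c => stepStates edges (String.ofList [c]) states) sts).any
        (fun s => accepting.contains s)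
      = sts.any (fun s => nfsmsimGo cs s edges accepting) := by
  induction cs generalizing sts with
  | nil => simp [nfsmsimGo]
  | cons c rest ih =>
    simp only [List.foldl_cons]
    rw [ih]
    rw [Bool.eq_iff_iff]
    simp only [List.any_eq_true]
    constructor
    · rintro ⟨x, hx, hgo⟩
      rw [stepStates] at hx
      rcases (mem_stepFold edges (String.ofList [c]) sts [] x).mp hx with h | ⟨s, hs, ns, hl, hn⟩
      · simp at h
      · refine ⟨s, hs, ?_⟩
        simp only [nfsmsimGo, hl, List.any_eq_true]
        exact ⟨x, hn, hgo⟩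
    · rintro ⟨s, hs, hgo⟩
      simp only [nfsmsimGo] at hgo
      rcases h : lookupEdge edges s (String.ofList [c]) with _ | ns
      · rw [h] at hgo; simp at hgo
      · rw [h] at hgo
        simp only [List.any_eq_true] at hgo
        rcases hgo with ⟨x, hx, hgo⟩
        refine ⟨x, ?_, hgo⟩
        rw [stepStates]
        exact (mem_stepFold edges (String.ofList [c]) sts [] x).mpr (Or.inr ⟨s, hs, ns, h, hx⟩)


-- ===== VERDICT (by name: the statement is the Claim_ definition above) =====
theorem nfsmsim_spec : Claim_equal_nfsmsim := by
  intro string current edges accepting _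
  unfold Spec_nfsmsim nfsmsim nfsmsim_alt
  rw [subset_sim_eq]
  simp
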